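-- pv_equiv track=rewrite | github.com/SRINJOY4119/Capital_One_Launchpad | Deep_Research/planner_agent.py | _analyze_task_complexity
-- ===== SOURCE A (Python) =====
-- def _analyze_task_complexity(task_description: str) -> int:
--     """Determine number of subsearch agents needed based on task complexity"""
--     complexity_indicators = {
--         'analyze': 2,
--         'research': 2,
--         'investigate': 2,
--         'compare': 2,
--         'evaluate': 3,
--         'synthesize': 3,
--         'integrate': 3,
--         'optimize': 3
--     }
--
--     base_agents = 1
--     for indicator, value in complexity_indicators.items():
--         if indicator in task_description.lower():
--             base_agents = max(base_agents, value)
--     return base_agents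
-- ===== SOURCE B (Python) =====
-- def _analyze_task_complexity(task_description: str) -> int:
--     """Determine number of subsearch agents needed based on task complexity"""
--     text = task_description.lower()
--     if any(k in text for k in ('evaluate', 'synthesize', 'integrate', 'optimize')):
--         return 3
--     if any(k in text for k in ('analyze', 'research', 'investigate', 'compare')):
--         return 2
--     return 1
-- ===== Notes on version B (the rewrite author's own statement) =====
-- stated objective: simpler
-- what changed: Replaces the dict-driven scan-all-then-max accumulator loop with a priority-ordered tiered check: lowercase once, return 3 if any high-complexity keyword occurs, else 2 if any medium keyword occurs, else 1.
import Mathlib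
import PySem

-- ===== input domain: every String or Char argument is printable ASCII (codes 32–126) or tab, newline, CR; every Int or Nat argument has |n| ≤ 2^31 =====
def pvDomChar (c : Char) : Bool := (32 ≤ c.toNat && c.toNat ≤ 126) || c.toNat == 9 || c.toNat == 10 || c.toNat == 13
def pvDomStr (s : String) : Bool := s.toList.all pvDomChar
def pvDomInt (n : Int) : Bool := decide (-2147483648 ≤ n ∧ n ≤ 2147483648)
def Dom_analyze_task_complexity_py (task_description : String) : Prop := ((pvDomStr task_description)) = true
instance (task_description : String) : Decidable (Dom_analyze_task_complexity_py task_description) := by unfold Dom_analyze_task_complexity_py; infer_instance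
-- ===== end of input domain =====

-- B replaces the scan-all-then-max dict loop with a priority-tiered early-return check (simpler decomposition).


-- ===== PORT A =====
def analyze_task_complexity_py (task_description : String) : Int :=
  let complexity_indicators : List (String × Int) :=
    [("analyze", 2), ("research", 2), ("investigate", 2), ("compare", 2),
     ("evaluate", 3), ("synthesize", 3), ("integrate", 3), ("optimize", 3)]
  complexity_indicators.foldl
    (fun base_agents iv =>
      if PySem.Str.isIn iv.1 (PySem.Str.lower task_description) then max base_agents iv.2
      else base_agents) 1

-- ===== PORT B =====
def analyze_task_complexity_py_alt (task_description : String) : Int :=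
  let text := PySem.Str.lower task_description
  if ["evaluate", "synthesize", "integrate", "optimize"].any (fun k => PySem.Str.isIn k text) then 3
  else if ["analyze", "research", "investigate", "compare"].any (fun k => PySem.Str.isIn k text) then 2
  else 1

-- ===== PRECONDITION & SPEC =====
def Spec_analyze_task_complexity_py (task_description : String) (out : Int) : Prop := out = analyze_task_complexity_py_alt task_description
instance (task_description : String) (out : Int) : Decidable (Spec_analyze_task_complexity_py task_description out) := by unfold Spec_analyze_task_complexity_py; infer_instance

-- ===== CLAIM (what is proved, stated in full; the proofs are below) =====
def Claim_equal_analyze_task_complexity_py : Prop := ∀ (task_description : String), Dom_analyze_task_complexity_py task_description → Spec_analyze_task_complexity_py task_description (analyze_task_complexity_py task_description)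

-- ===== LEMMAS AND PROOFS =====

-- ===== VERDICT (by name: the statement is the Claim_ definition above) =====
set_option maxHeartbeats 2000000 in
theorem analyze_task_complexity_py_spec : Claim_equal_analyze_task_complexity_py := by
  intro td _
  unfold Spec_analyze_task_complexity_py analyze_task_complexity_py analyze_task_complexity_py_alt
  simp only [List.foldl, List.any, Bool.or_eq_true]
  split_ifs <;> simp_all
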